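-- pv_equiv track=rewrite | github.com/EmranCo/freelance2023 | Convex Hull/c/using queue.py | remove_extremal_points
-- ===== SOURCE A (Python) =====
-- from collections import deque
--
-- def remove_extremal_points(points):
--     # Create a queue to store the points
--     q = deque()
--
--     # Add all points to the queue
--     for point in points:
--         q.append(point)
--
--     # Initialize variables for the extremal points
--     min_x = float('inf')
--     max_x = float('-inf')
--     min_y = float('inf')
--     max_y = float('-inf')
--
--     # Find the extremal points
--     while q:
--         point = q.popleft()
--         if point[0] < min_x:
--             min_x = point[0]
--         if point[0] > max_x:
--             max_x = point[0]
--         if point[1] < min_y: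
--             min_y = point[1]
--         if point[1] > max_y:
--             max_y = point[1]
--
--     # Create a list to store the remaining points
--     remaining_points = []
--
--     # Iterate through the points again and add the non-extremal points to the list
--     for point in points:
--         if point[0] != min_x and point[0] != max_x and point[1] != min_y and point[1] != max_y:
--             remaining_points.append(point)
--
--     return remaining_points
-- ===== SOURCE B (Python) =====
-- def remove_extremal_points(points):
--     # A point is kept iff it is strictly "interior" in each coordinate:
--     # some point lies strictly below it and some strictly above it.
--     # Equivalent to A (x != min_x iff some q.x < x, etc.), no extremes computed.
--     def interior(v, vals):
--         return any(w < v for w in vals) and any(w > v for w in vals)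
--     xs = [q[0] for q in points]
--     ys = [q[1] for q in points]
--     return [p for p in points if interior(p[0], xs) and interior(p[1], ys)]
-- ===== Notes on version B (the rewrite author's own statement) =====
-- stated objective: alternative
-- what changed: B never computes the min/max extremes: it keeps a point iff some other point is strictly smaller and some strictly larger in each coordinate (an any/any nested-scan test), replacing A's deque-drain extremum accumulation entirely.
import Mathlib
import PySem

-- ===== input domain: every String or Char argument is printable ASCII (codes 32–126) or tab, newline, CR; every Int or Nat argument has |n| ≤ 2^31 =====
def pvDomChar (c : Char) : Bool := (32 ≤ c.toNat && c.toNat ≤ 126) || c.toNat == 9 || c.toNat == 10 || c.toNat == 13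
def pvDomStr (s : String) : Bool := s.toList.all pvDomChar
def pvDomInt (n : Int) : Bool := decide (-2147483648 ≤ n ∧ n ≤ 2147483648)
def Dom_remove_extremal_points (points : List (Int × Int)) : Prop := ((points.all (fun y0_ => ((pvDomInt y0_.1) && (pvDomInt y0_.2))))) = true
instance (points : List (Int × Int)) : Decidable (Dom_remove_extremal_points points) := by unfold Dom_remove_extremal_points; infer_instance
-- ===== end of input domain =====

-- B never computes the min/max extremes: it keeps a point iff some point is strictly
-- smaller and some strictly larger in each coordinate (objective: alternative).

-- ===== PORT A =====
-- float('inf') / float('-inf') sentinels are modelled by Option Int 'none' (no Int ever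
-- equals or exceeds them, so the comparisons below are exact on integer inputs).
def pvLtInf (x : Int) (m : Option Int) : Bool := match m with | none => true | some v => x < v
def pvGtNegInf (x : Int) (m : Option Int) : Bool := match m with | none => true | some v => v < x
def pvNeExt (x : Int) (m : Option Int) : Bool := match m with | none => true | some v => x ≠ v

def remove_extremal_points (points : List (Int × Int)) : List (Int × Int) :=
  -- the queue is filled with the points and drained front to back: a fold over points
  let st := points.foldl
    (fun (s : Option Int × Option Int × Option Int × Option Int) p =>
      let s1 := if pvLtInf p.1 s.1 then some p.1 else s.1
      let s2 := if pvGtNegInf p.1 s.2.1 then some p.1 else s.2.1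
      let s3 := if pvLtInf p.2 s.2.2.1 then some p.2 else s.2.2.1
      let s4 := if pvGtNegInf p.2 s.2.2.2 then some p.2 else s.2.2.2
      (s1, s2, s3, s4))
    (none, none, none, none)
  points.foldl
    (fun acc p =>
      if pvNeExt p.1 st.1 && pvNeExt p.1 st.2.1 && pvNeExt p.2 st.2.2.1 && pvNeExt p.2 st.2.2.2
      then acc ++ [p] else acc)
    []

-- ===== PORT B =====
-- interior(v, vals) = any(w < v for w in vals) and any(w > v for w in vals)
def pvInterior (v : Int) (vals : List Int) : Bool :=
  vals.any (fun w => w < v) && vals.any (fun w => v < w)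

def remove_extremal_points_alt (points : List (Int × Int)) : List (Int × Int) :=
  let xs := points.map Prod.fst
  let ys := points.map Prod.snd
  points.filter (fun p => pvInterior p.1 xs && pvInterior p.2 ys)

-- ===== PRECONDITION & SPEC =====
def Spec_remove_extremal_points (points : List (Int × Int)) (out : List (Int × Int)) : Prop := out = remove_extremal_points_alt points
instance (points : List (Int × Int)) (out : List (Int × Int)) : Decidable (Spec_remove_extremal_points points out) := by unfold Spec_remove_extremal_points; infer_instance

-- ===== CLAIM (what is proved, stated in full; the proofs are below) =====
def Claim_equal_remove_extremal_points : Prop := ∀ (points : List (Int × Int)), Dom_remove_extremal_points points → Spec_remove_extremal_points points (remove_extremal_points points)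

-- ===== LEMMAS AND PROOFS =====

-- A's four-accumulator scan, once all four accumulators are live, is the four running min/max folds.
theorem pv_fold_some (l : List (Int × Int)) (a b c d : Int) :
    l.foldl
      (fun (s : Option Int × Option Int × Option Int × Option Int) p =>
        let s1 := if pvLtInf p.1 s.1 then some p.1 else s.1
        let s2 := if pvGtNegInf p.1 s.2.1 then some p.1 else s.2.1
        let s3 := if pvLtInf p.2 s.2.2.1 then some p.2 else s.2.2.1
        let s4 := if pvGtNegInf p.2 s.2.2.2 then some p.2 else s.2.2.2
        (s1, s2, s3, s4))
      (some a, some b, some c, some d)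
    = (some ((l.map Prod.fst).foldl min a), some ((l.map Prod.fst).foldl max b),
       some ((l.map Prod.snd).foldl min c), some ((l.map Prod.snd).foldl max d)) := by
  induction l generalizing a b c d with
  | nil => rfl
  | cons h t ih =>
    simp only [List.foldl_cons, List.map_cons, pvLtInf, pvGtNegInf]
    have e1 : (if (h.1 < a : Bool) then some h.1 else some a) = some (min a h.1) := by
      by_cases hx : h.1 < a <;> simp [hx, min_def]
    have e2 : (if (b < h.1 : Bool) then some h.1 else some b) = some (max b h.1) := by
      by_cases hx : b < h.1 <;> simp [hx, max_def] <;> omega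
    have e3 : (if (h.2 < c : Bool) then some h.2 else some c) = some (min c h.2) := by
      by_cases hx : h.2 < c <;> simp [hx, min_def]
    have e4 : (if (d < h.2 : Bool) then some h.2 else some d) = some (max d h.2) := by
      by_cases hx : d < h.2 <;> simp [hx, max_def] <;> omega
    rw [e1, e2, e3, e4]
    exact ih _ _ _ _

theorem pv_foldl_filter {α : Type} (p : α → Bool) (l : List α) (acc : List α) :
    l.foldl (fun acc x => if p x = true then acc ++ [x] else acc) acc = acc ++ l.filter p := by
  induction l generalizing acc with
  | nil => simp
  | cons h t ih => by_cases hp : p h <;> simp [hp, ih]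

theorem pv_fmin_mem : ∀ (t : List Int) (a : Int), t.foldl min a ∈ a :: t := by
  intro t
  induction t with
  | nil => intro a; simp
  | cons h t ih =>
    intro a
    simp only [List.foldl_cons]
    rcases List.mem_cons.mp (ih (min a h)) with he | ht
    · rw [he]; rcases min_choice a h with h1 | h1 <;> simp [h1]
    · simp [ht]

theorem pv_fmax_mem : ∀ (t : List Int) (a : Int), t.foldl max a ∈ a :: t := by
  intro t
  induction t with
  | nil => intro a; simp
  | cons h t ih =>
    intro a
    simp only [List.foldl_cons]
    rcases List.mem_cons.mp (ih (max a h)) with he | ht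
    · rw [he]; rcases max_choice a h with h1 | h1 <;> simp [h1]
    · simp [ht]

theorem pv_fmin_init (t : List Int) (a : Int) : t.foldl min a ≤ a := by
  induction t generalizing a with
  | nil => simp
  | cons h t ih => exact le_trans (ih (min a h)) (min_le_left a h)

theorem pv_fmax_init (t : List Int) (a : Int) : a ≤ t.foldl max a := by
  induction t generalizing a with
  | nil => simp
  | cons h t ih => exact le_trans (le_max_left a h) (ih (max a h))

theorem pv_fmin_le (t : List Int) (a y : Int) (hy : y ∈ a :: t) : t.foldl min a ≤ y := by
  induction t generalizing a with
  | nil => simp at hy; simp [hy]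
  | cons h t ih =>
    simp only [List.foldl_cons]
    rcases List.mem_cons.mp hy with he | ht
    · exact le_trans (pv_fmin_init t (min a h)) (le_of_le_of_eq (min_le_left a h) he.symm)
    · rcases List.mem_cons.mp ht with he2 | ht2
      · exact le_trans (pv_fmin_init t (min a h)) (le_of_le_of_eq (min_le_right a h) he2.symm)
      · exact ih (min a h) (List.mem_cons_of_mem _ ht2)

theorem pv_fmax_ge (t : List Int) (a y : Int) (hy : y ∈ a :: t) : y ≤ t.foldl max a := by
  induction t generalizing a with
  | nil => simp at hy; simp [hy]
  | cons h t ih =>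
    simp only [List.foldl_cons]
    rcases List.mem_cons.mp hy with he | ht
    · exact le_trans (le_of_eq he) (le_trans (le_max_left a h) (pv_fmax_init t (max a h)))
    · rcases List.mem_cons.mp ht with he2 | ht2
      · exact le_trans (le_of_eq he2) (le_trans (le_max_right a h) (pv_fmax_init t (max a h)))
      · exact ih (max a h) (List.mem_cons_of_mem _ ht2)

-- x (a member) differs from the running minimum iff some element is strictly below x
theorem pv_ne_fmin_iff (t : List Int) (a x : Int) (hx : x ∈ a :: t) :
    x ≠ t.foldl min a ↔ ∃ w ∈ a :: t, w < x := by
  constructor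
  · intro hne
    refine ⟨t.foldl min a, pv_fmin_mem t a, ?_⟩
    have hle := pv_fmin_le t a x hx
    omega
  · rintro ⟨w, hw, hlt⟩ he
    have := pv_fmin_le t a w hw
    omega

theorem pv_ne_fmax_iff (t : List Int) (a x : Int) (hx : x ∈ a :: t) :
    x ≠ t.foldl max a ↔ ∃ w ∈ a :: t, x < w := by
  constructor
  · intro hne
    refine ⟨t.foldl max a, pv_fmax_mem t a, ?_⟩
    have hle := pv_fmax_ge t a x hx
    omega
  · rintro ⟨w, hw, hlt⟩ he
    have := pv_fmax_ge t a w hw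
    omega

theorem remove_extremal_points_eq (points : List (Int × Int)) :
    remove_extremal_points points = remove_extremal_points_alt points := by
  cases points with
  | nil => rfl
  | cons p0 rest =>
    unfold remove_extremal_points remove_extremal_points_alt
    simp only [List.foldl_cons, List.map_cons]
    rw [show ((if pvLtInf p0.1 none then some p0.1 else none,
               if pvGtNegInf p0.1 none then some p0.1 else none,
               if pvLtInf p0.2 none then some p0.2 else none,
               if pvGtNegInf p0.2 none then some p0.2 else none) :
               Option Int × Option Int × Option Int × Option Int)
          = (some p0.1, some p0.1, some p0.2, some p0.2) from rfl]
    rw [pv_fold_some]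
    simp only [pvNeExt]
    refine (pv_foldl_filter _ rest _).trans ?_
    have hpred : ∀ p ∈ p0 :: rest,
        (pvInterior p.1 (p0.1 :: rest.map Prod.fst)
          && pvInterior p.2 (p0.2 :: rest.map Prod.snd))
        = (decide (p.1 ≠ (rest.map Prod.fst).foldl min p0.1) &&
           decide (p.1 ≠ (rest.map Prod.fst).foldl max p0.1) &&
           decide (p.2 ≠ (rest.map Prod.snd).foldl min p0.2) &&
           decide (p.2 ≠ (rest.map Prod.snd).foldl max p0.2)) := by
      intro p hp
      have hx : p.1 ∈ p0.1 :: rest.map Prod.fst := by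
        rcases List.mem_cons.mp hp with he | ht
        · simp [he]
        · exact List.mem_cons_of_mem _ (List.mem_map_of_mem ht)
      have hy : p.2 ∈ p0.2 :: rest.map Prod.snd := by
        rcases List.mem_cons.mp hp with he | ht
        · simp [he]
        · exact List.mem_cons_of_mem _ (List.mem_map_of_mem ht)
      rw [Bool.eq_iff_iff]
      simp only [pvInterior, Bool.and_eq_true, decide_eq_true_eq, List.any_eq_true,
        decide_eq_true_eq]
      rw [← pv_ne_fmin_iff _ _ _ hx, ← pv_ne_fmax_iff _ _ _ hx,
          ← pv_ne_fmin_iff _ _ _ hy, ← pv_ne_fmax_iff _ _ _ hy]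
      tauto
    rw [List.filter_congr hpred]
    rw [List.filter_cons]
    split_ifs <;> simp

-- ===== VERDICT (by name: the statement is the Claim_ definition above) =====
theorem remove_extremal_points_spec : Claim_equal_remove_extremal_points := by
  intro points _
  exact remove_extremal_points_eq points
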